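-- pv_equiv track=rewrite | github.com/gagan114662/hermes-agent | scripts/growth_engine.py | _make_teaser
-- ===== SOURCE A (Python) =====
-- def _make_teaser(full_message: str) -> str:
--     """First ~1200 chars — intro + bullet summary only, stops before deliverables."""
--     lines = full_message.split("\n")
--     teaser_lines = []
--     for line in lines:
--         if line.strip().startswith("---"):
--             break
--         teaser_lines.append(line)
--     teaser = "\n".join(teaser_lines).strip()
--     if len(teaser) > 1200:
--         teaser = teaser[:1200] + "..."
--     return teaser
-- ===== SOURCE B (Python) =====
-- def _make_teaser(full_message: str) -> str:
--     """Locate the first separator line by character offset and slice once,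
--     instead of splitting into a line list and re-joining."""
--     n = len(full_message)
--     cut = n
--     pos = 0
--     while True:
--         nl = full_message.find("\n", pos)
--         end = n if nl == -1 else nl
--         if full_message[pos:end].strip().startswith("---"):
--             cut = pos
--             break
--         if nl == -1:
--             break
--         pos = nl + 1
--     teaser = full_message[:cut].strip()
--     if len(teaser) > 1200:
--         teaser = teaser[:1200] + "..."
--     return teaser
-- ===== Notes on version B (the rewrite author's own statement) =====
-- stated objective: alternative
-- what changed: B locates the cut as a character offset with str.find in a single offset loop and slices the original string once, instead of splitting into a line list, accumulating lines and re-joining them.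
import Mathlib
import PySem

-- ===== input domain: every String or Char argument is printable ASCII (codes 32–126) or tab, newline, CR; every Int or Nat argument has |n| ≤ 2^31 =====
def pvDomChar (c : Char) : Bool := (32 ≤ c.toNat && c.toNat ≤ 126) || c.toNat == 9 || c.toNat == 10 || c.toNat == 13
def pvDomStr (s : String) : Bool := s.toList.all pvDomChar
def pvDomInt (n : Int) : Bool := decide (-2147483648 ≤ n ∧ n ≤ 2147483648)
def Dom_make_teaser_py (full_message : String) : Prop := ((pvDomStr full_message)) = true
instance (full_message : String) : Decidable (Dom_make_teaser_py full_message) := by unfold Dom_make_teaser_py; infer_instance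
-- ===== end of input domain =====

-- B locates the separator by character offset (str.find) and slices once, instead of A's split/accumulate/join; alternative decomposition, same O(n) cost.

-- ===== PORT A =====
-- the for-loop with break, accumulating teaser_lines
def teaserLoopA (lines : List (List Char)) (acc : List (List Char)) : List (List Char) :=
  match lines with
  | [] => acc
  | line :: rest =>
    if PySem.Chars.startswith (PySem.Chars.strip line) ['-', '-', '-'] then acc
    else teaserLoopA rest (acc ++ [line])

def make_teaser_py (full_message : String) : String :=
  let cs := full_message.toList
  let lines := (PySem.Chars.split? cs ['\n']).getD []      -- full_message.split("\n"); sep ≠ "" so always some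
  let teaser := PySem.Chars.strip (PySem.Chars.join ['\n'] (teaserLoopA lines []))
  let teaser := if 1200 < PySem.Chars.len teaser
    then PySem.Chars.slice teaser none (some 1200) ++ ['.', '.', '.']
    else teaser
  String.ofList teaser

-- ===== PORT B =====
-- termination fact for the offset loop: a found newline lies in [pos, length)
theorem pv_findFrom_past (cs : List Char) (pos : Nat) (h : cs.length < pos) :
    PySem.Chars.findFrom cs ['\n'] (pos : Int) = -1 := by
  simp only [PySem.Chars.findFrom]
  rw [if_neg (show ¬((pos : Int) < 0) from by omega)]
  rw [if_pos (show ((cs.length : Int) < (pos : Int)) from by exact_mod_cast h)]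

theorem pvFindNlBounds (cs : List Char) (pos : Nat)
    (h : PySem.Chars.findFrom cs ['\n'] (pos : Int) ≠ -1) :
    pos ≤ (PySem.Chars.findFrom cs ['\n'] (pos : Int)).toNat ∧
    (PySem.Chars.findFrom cs ['\n'] (pos : Int)).toNat < cs.length := by
  by_cases hp : pos ≤ cs.length
  · obtain ⟨h1, h2, _⟩ := PySem.Chars.findFrom_natCast_spec cs ['\n'] pos hp h
    constructor
    · omega
    · obtain ⟨t, ht⟩ := h2
      have := congrArg List.length ht
      simp at this
      omega
  · exact absurd (pv_findFrom_past cs pos (by omega)) h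

-- the while-loop of Source B: returns the cut offset
def scanB (cs : List Char) (pos : Nat) : Nat :=
  let nl := PySem.Chars.findFrom cs ['\n'] (pos : Int)
  let e : Int := if nl = -1 then (cs.length : Int) else nl
  if PySem.Chars.startswith (PySem.Chars.strip (PySem.Chars.slice cs (some (pos : Int)) (some e))) ['-', '-', '-'] then
    pos
  else if h : nl = -1 then
    cs.length
  else
    scanB cs (nl.toNat + 1)
termination_by cs.length - pos
decreasing_by
  have := pvFindNlBounds cs pos h
  omega

def make_teaser_py_alt (full_message : String) : String :=
  let cs := full_message.toList
  let cut := scanB cs 0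
  let teaser := PySem.Chars.strip (PySem.Chars.slice cs none (some (cut : Int)))
  let teaser := if 1200 < PySem.Chars.len teaser
    then PySem.Chars.slice teaser none (some 1200) ++ ['.', '.', '.']
    else teaser
  String.ofList teaser

-- ===== PRECONDITION & SPEC =====
def Spec_make_teaser_py (full_message : String) (out : String) : Prop := out = make_teaser_py_alt full_message
instance (full_message : String) (out : String) : Decidable (Spec_make_teaser_py full_message out) := by unfold Spec_make_teaser_py; infer_instance

-- ===== CLAIM (what is proved, stated in full; the proofs are below) =====
def Claim_equal_make_teaser_py : Prop := ∀ (full_message : String), Dom_make_teaser_py full_message → Spec_make_teaser_py full_message (make_teaser_py full_message)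


-- ===== LEMMAS AND PROOFS =====

-- the separator test as a Bool predicate
def pvBad (l : List Char) : Bool := PySem.Chars.startswith (PySem.Chars.strip l) ['-', '-', '-']

-- structural split on newline (proof-side model of str.split("\n"))
def splitNL (cs : List Char) : List (List Char) :=
  if h : '\n' ∈ cs then
    cs.takeWhile (· ≠ '\n') :: splitNL ((cs.dropWhile (· ≠ '\n')).tail)
  else [cs]
termination_by cs.length
decreasing_by
  have h1 : cs.dropWhile (· ≠ '\n') ≠ [] := by
    intro he
    have := (List.dropWhile_eq_nil_iff).mp he '\n' h
    simp at this
  have h2 := List.length_dropWhile_le (fun c => decide (c ≠ '\n')) cs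
  cases hd : cs.dropWhile (· ≠ '\n') with
  | nil => exact absurd hd h1
  | cons d t =>
    rw [hd] at h2
    simp only [hd, List.tail_cons]
    simp at h2
    omega

-- the cut offset (proof-side model of scanB)
def cutLen (cs : List Char) : Nat :=
  if pvBad (cs.takeWhile (· ≠ '\n')) then 0
  else if h : '\n' ∈ cs then
    (cs.takeWhile (· ≠ '\n')).length + 1 + cutLen ((cs.dropWhile (· ≠ '\n')).tail)
  else cs.length
termination_by cs.length
decreasing_by
  have h1 : cs.dropWhile (· ≠ '\n') ≠ [] := by
    intro he
    have := (List.dropWhile_eq_nil_iff).mp he '\n' h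
    simp at this
  have h2 := List.length_dropWhile_le (fun c => decide (c ≠ '\n')) cs
  cases hd : cs.dropWhile (· ≠ '\n') with
  | nil => exact absurd hd h1
  | cons d t =>
    rw [hd] at h2
    simp only [hd, List.tail_cons]
    simp at h2
    omega

theorem pv_findgo_singleton (c : Char) : ∀ (l : List Char) (k : Nat),
    PySem.Chars.find.go [c] l k =
      if c ∈ l then ((k + (l.takeWhile (· ≠ c)).length : Nat) : Int) else -1 := by
  intro l
  induction l with
  | nil => intro k; simp [PySem.Chars.find.go.eq_1]
  | cons a t ih =>
    intro k
    rw [PySem.Chars.find.go.eq_2]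
    by_cases hc : a = c
    · subst hc
      have hp : [a].isPrefixOf (a :: t) = true := by simp [List.isPrefixOf]
      simp [hp, List.takeWhile_cons]
    · have hp : [c].isPrefixOf (a :: t) = false := by
        simp only [List.isPrefixOf, Bool.and_eq_false_iff, beq_eq_false_iff_ne, ne_eq]
        exact Or.inl fun he => hc he.symm
      rw [hp]
      simp only [Bool.false_eq_true, if_false, ih (k + 1)]
      have hmem : (c ∈ a :: t) ↔ (c ∈ t) := by
        constructor
        · intro h
          rcases List.mem_cons.mp h with he | ht
          · exact absurd he.symm hc
          · exact ht
        · exact fun h => List.mem_cons_of_mem _ h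
      rw [List.takeWhile_cons, if_pos (show decide (a ≠ c) = true from by simpa using hc)]
      by_cases hm : c ∈ t
      · rw [if_pos hm, if_pos (hmem.mpr hm)]
        simp only [List.length_cons]
        omega
      · rw [if_neg hm, if_neg (fun h => hm (hmem.mp h))]
theorem pv_find_singleton (l : List Char) (c : Char) :
    PySem.Chars.find l [c] = if c ∈ l then (((l.takeWhile (· ≠ c)).length : Nat) : Int) else -1 := by
  show PySem.Chars.find.go [c] l 0 = _
  rw [pv_findgo_singleton]
  simp

theorem pv_dropWhile_cons_of_mem {cs : List Char} (h : '\n' ∈ cs) :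
    cs.dropWhile (· ≠ '\n') = '\n' :: (cs.dropWhile (· ≠ '\n')).tail := by
  induction cs with
  | nil => simp at h
  | cons a t ih =>
    by_cases ha : a = '\n'
    · subst ha; simp [List.dropWhile_cons]
    · have ht : '\n' ∈ t := by
        rcases List.mem_cons.mp h with he | ht
        · exact absurd he.symm ha
        · exact ht
      rw [List.dropWhile_cons, if_pos (show decide (a ≠ '\n') = true from by simpa using ha)]
      exact ih ht
theorem pv_decomp {cs : List Char} (h : '\n' ∈ cs) :
    cs = cs.takeWhile (· ≠ '\n') ++ '\n' :: (cs.dropWhile (· ≠ '\n')).tail := by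
  conv_lhs => rw [← List.takeWhile_append_dropWhile (p := fun c => decide (c ≠ '\n')) (l := cs)]
  rw [← pv_dropWhile_cons_of_mem h]

theorem pv_takeWhile_not_mem {cs : List Char} (h : '\n' ∉ cs) :
    cs.takeWhile (· ≠ '\n') = cs := by
  rw [List.takeWhile_eq_self_iff]
  intro x hx
  simp only [decide_eq_true_eq]
  exact fun he => h (he ▸ hx)

theorem splitNL_mem {cs : List Char} (h : '\n' ∈ cs) :
    splitNL cs = cs.takeWhile (· ≠ '\n') :: splitNL ((cs.dropWhile (· ≠ '\n')).tail) := by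
  rw [splitNL]; simp [h]

theorem splitNL_not_mem {cs : List Char} (h : '\n' ∉ cs) : splitNL cs = [cs] := by
  rw [splitNL]; simp [h]

theorem splitNL_head (cs : List Char) :
    ∃ t, splitNL cs = cs.takeWhile (· ≠ '\n') :: t := by
  by_cases h : '\n' ∈ cs
  · exact ⟨_, splitNL_mem h⟩
  · rw [splitNL_not_mem h, pv_takeWhile_not_mem h]
    exact ⟨[], rfl⟩

theorem pv_splitNL_cons_newline (r : List Char) : splitNL ('\n' :: r) = [] :: splitNL r := by
  rw [splitNL_mem (by simp)]
  simp [List.takeWhile_cons, List.dropWhile_cons]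

theorem pv_splitNL_cons {c : Char} (r : List Char) (hc : c ≠ '\n') :
    splitNL (c :: r) = (splitNL r).modifyHead (c :: ·) := by
  by_cases h : '\n' ∈ r
  · rw [splitNL_mem (by simp [h]), splitNL_mem h]
    simp [List.takeWhile_cons, List.dropWhile_cons, hc]
  · have h2 : '\n' ∉ c :: r := by simp [h, Ne.symm hc]
    rw [splitNL_not_mem h2, splitNL_not_mem h]
    simp

theorem pv_go_spec : ∀ (fuel : Nat) (l cur : List Char) (acc : List (List Char)),
    l.length ≤ fuel →
    PySem.Chars.splitOn.go ['\n'] fuel l cur acc =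
      acc.reverse ++ (splitNL l).modifyHead (cur.reverse ++ ·) := by
  intro fuel
  induction fuel with
  | zero =>
    intro l cur acc hl
    have hl0 : l = [] := List.length_eq_zero_iff.mp (by omega)
    subst hl0
    rw [PySem.Chars.splitOn.go.eq_1, splitNL_not_mem (by simp)]
    simp
  | succ f ih =>
    intro l cur acc hl
    cases l with
    | nil =>
      rw [PySem.Chars.splitOn.go.eq_2 _ _ _ _ (by omega), splitNL_not_mem (by simp)]
      simp
    | cons a t =>
      rw [PySem.Chars.splitOn.go.eq_3]
      simp only [List.length_cons] at hl
      by_cases ha : a = '\n'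
      · subst ha
        have hp : ['\n'].isPrefixOf ('\n' :: t) = true := by simp [List.isPrefixOf]
        rw [if_pos hp]
        have hdrop : List.drop (['\n'] : List Char).length ('\n' :: t) = t := by simp
        rw [hdrop, ih t [] (cur.reverse :: acc) (by omega), pv_splitNL_cons_newline]
        obtain ⟨tl, hsp⟩ := splitNL_head t
        rw [hsp]
        simp [List.modifyHead]
      · have hp : ['\n'].isPrefixOf (a :: t) = false := by
          simp only [List.isPrefixOf, Bool.and_eq_false_iff, beq_eq_false_iff_ne, ne_eq]
          exact Or.inl fun he => ha he.symm
        rw [if_neg (by simp [hp]), ih t (a :: cur) acc (by omega), pv_splitNL_cons t ha]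
        obtain ⟨tl, hsp⟩ := splitNL_head t
        rw [hsp]
        simp [List.modifyHead]
theorem pv_splitOn_eq (cs : List Char) : PySem.Chars.splitOn cs ['\n'] = splitNL cs := by
  show PySem.Chars.splitOn.go ['\n'] (cs.length + 1) cs [] [] = _
  rw [pv_go_spec (cs.length + 1) cs [] [] (by omega)]
  obtain ⟨tl, hsp⟩ := splitNL_head cs
  rw [hsp]
  simp [List.modifyHead]

theorem pv_loopA_eq : ∀ (ls acc : List (List Char)),
    teaserLoopA ls acc = acc ++ ls.takeWhile (fun l => !pvBad l) := by
  intro ls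
  induction ls with
  | nil => intro acc; simp [teaserLoopA]
  | cons l rest ih =>
    intro acc
    rw [teaserLoopA, List.takeWhile_cons]
    by_cases hb : pvBad l
    · have hb' : PySem.Chars.startswith (PySem.Chars.strip l) ['-', '-', '-'] = true := by
        simpa [pvBad] using hb
      simp [hb', hb]
    · have hb' : PySem.Chars.startswith (PySem.Chars.strip l) ['-', '-', '-'] = false := by
        simpa [pvBad] using hb
      rw [if_neg (by simp [hb']), ih (acc ++ [l])]
      simp [hb]
theorem pv_take_takeWhile (l : List Char) :
    l.take (l.takeWhile (· ≠ '\n')).length = l.takeWhile (· ≠ '\n') := by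
  have h := List.take_left (l₁ := l.takeWhile (· ≠ '\n')) (l₂ := l.dropWhile (· ≠ '\n'))
  rwa [List.takeWhile_append_dropWhile] at h

theorem pv_cutLen_nil : cutLen ([] : List Char) = 0 := by
  rw [cutLen]
  simp only [List.takeWhile_nil]
  rw [if_neg (by decide), dif_neg (by simp)]
  rfl

theorem pv_drop_suffix (l : List Char) (hm : '\n' ∈ l) :
    l.drop ((l.takeWhile (· ≠ '\n')).length + 1) = (l.dropWhile (· ≠ '\n')).tail := by
  have h := congrArg (List.drop ((l.takeWhile (· ≠ '\n')).length + 1)) (pv_decomp hm)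
  rw [h, List.drop_append]
  simp

-- scanB computes pos + cutLen of the remaining suffix
theorem pv_scanB_eq : ∀ (n : Nat) (cs : List Char) (pos : Nat), pos ≤ cs.length →
    cs.length - pos ≤ n → scanB cs pos = pos + cutLen (cs.drop pos) := by
  intro n
  induction n with
  | zero =>
    intro cs pos hp hn
    have hdrop : cs.drop pos = [] := List.drop_eq_nil_of_le (by omega)
    have hnl : PySem.Chars.findFrom cs ['\n'] (pos : Int) = -1 := by
      rw [PySem.Chars.findFrom_natCast cs ['\n'] pos hp, hdrop, pv_find_singleton]
      simp
    have hline : PySem.Chars.slice cs (some (pos : Int)) (some ((cs.length : Nat) : Int)) = [] := by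
      rw [PySem.Chars.slice_eq_listSlice]
      rw [show ((cs.length : Nat) : Int) = (pos : Int) + ((0 : Nat) : Int) from by omega]
      rw [PySem.List.slice_natCast_add]
      simp
    rw [scanB, hnl]
    rw [if_pos (show (-1 : Int) = -1 from rfl)]
    rw [hline, if_neg (by decide)]
    rw [dif_pos (show (-1 : Int) = -1 from rfl)]
    rw [hdrop, pv_cutLen_nil]
    omega
  | succ m ih =>
    intro cs pos hp hn
    by_cases hm : '\n' ∈ cs.drop pos
    · -- a newline is found at offset pos + f
      have hfind := pv_find_singleton (cs.drop pos) '\n'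
      rw [if_pos hm] at hfind
      have hnl : PySem.Chars.findFrom cs ['\n'] (pos : Int) =
          ((pos + ((cs.drop pos).takeWhile (· ≠ '\n')).length : Nat) : Int) := by
        rw [PySem.Chars.findFrom_natCast cs ['\n'] pos hp, hfind, if_neg (by omega)]
        push_cast
        ring
      have hne : PySem.Chars.findFrom cs ['\n'] (pos : Int) ≠ -1 := by
        rw [hnl]; omega
      have hbounds := pvFindNlBounds cs pos hne
      rw [hnl] at hbounds
      simp only [Int.toNat_natCast] at hbounds
      have hline : PySem.Chars.slice cs (some (pos : Int))
          (some ((pos + ((cs.drop pos).takeWhile (· ≠ '\n')).length : Nat) : Int)) =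
          (cs.drop pos).takeWhile (· ≠ '\n') := by
        rw [PySem.Chars.slice_eq_listSlice]
        rw [show ((pos + ((cs.drop pos).takeWhile (· ≠ '\n')).length : Nat) : Int) =
            (pos : Int) + ((((cs.drop pos).takeWhile (· ≠ '\n')).length : Nat) : Int) from by
          push_cast; ring]
        rw [PySem.List.slice_natCast_add]
        exact pv_take_takeWhile _
      rw [scanB, hnl]
      rw [if_neg (show ¬ ((pos + ((cs.drop pos).takeWhile (· ≠ '\n')).length : Nat) : Int) = -1 by
        omega)]
      rw [hline]
      by_cases hb : pvBad ((cs.drop pos).takeWhile (· ≠ '\n'))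
      · rw [if_pos (by simpa [pvBad] using hb)]
        rw [cutLen, if_pos hb]
        omega
      · rw [if_neg (by simpa [pvBad] using hb)]
        rw [dif_neg (show ¬ ((pos + ((cs.drop pos).takeWhile (· ≠ '\n')).length : Nat) : Int) = -1
          by omega)]
        simp only [Int.toNat_natCast]
        have hrec := ih cs (pos + ((cs.drop pos).takeWhile (· ≠ '\n')).length + 1)
          (by omega) (by omega)
        rw [hrec]
        have hdd : cs.drop (pos + ((cs.drop pos).takeWhile (· ≠ '\n')).length + 1) =
            ((cs.drop pos).dropWhile (· ≠ '\n')).tail := by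
          rw [show pos + ((cs.drop pos).takeWhile (· ≠ '\n')).length + 1 =
              pos + (((cs.drop pos).takeWhile (· ≠ '\n')).length + 1) from by omega]
          rw [← List.drop_drop]
          exact pv_drop_suffix (cs.drop pos) hm
        rw [hdd]
        have hcut : cutLen (cs.drop pos) =
            ((cs.drop pos).takeWhile (· ≠ '\n')).length + 1 +
              cutLen ((cs.drop pos).dropWhile (· ≠ '\n')).tail := by
          rw [cutLen, if_neg hb, dif_pos hm]
        rw [hcut]
        omega
    · -- no newline after pos: the loop ends on the last line
      have hnl : PySem.Chars.findFrom cs ['\n'] (pos : Int) = -1 := by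
        rw [PySem.Chars.findFrom_natCast cs ['\n'] pos hp, pv_find_singleton, if_neg hm]
        simp
      have hline : PySem.Chars.slice cs (some (pos : Int)) (some ((cs.length : Nat) : Int)) =
          cs.drop pos := by
        rw [PySem.Chars.slice_eq_listSlice]
        rw [show ((cs.length : Nat) : Int) = (pos : Int) + ((cs.length - pos : Nat) : Int) from by
          omega]
        rw [PySem.List.slice_natCast_add]
        apply List.take_of_length_le
        simp
      rw [scanB, hnl]
      rw [if_pos (show (-1 : Int) = -1 from rfl)]
      rw [hline]
      rw [cutLen, pv_takeWhile_not_mem hm]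
      by_cases hb : pvBad (cs.drop pos)
      · rw [if_pos (by simpa [pvBad] using hb), if_pos hb]
        omega
      · rw [if_neg (by simpa [pvBad] using hb), if_neg hb, dif_neg hm,
          dif_pos (show (-1 : Int) = -1 from rfl)]
        have : (cs.drop pos).length = cs.length - pos := by simp
        omega

theorem pv_take_decomp (tw rest : List Char) (k : Nat) :
    (tw ++ '\n' :: rest).take (tw.length + 1 + k) = tw ++ '\n' :: rest.take k := by
  rw [List.take_append, List.take_of_length_le (by omega)]
  rw [show tw.length + 1 + k - tw.length = k + 1 from by omega]
  rw [List.take_succ_cons]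

theorem pv_take_cutLen (cs : List Char) :
    cs.take (cutLen cs) = PySem.Chars.join ['\n'] ((splitNL cs).takeWhile (fun l => !pvBad l)) ∨
    cs.take (cutLen cs) = PySem.Chars.join ['\n'] ((splitNL cs).takeWhile (fun l => !pvBad l)) ++ ['\n'] := by
  induction cs using cutLen.induct with
  | case1 cs hb =>
    left
    rw [cutLen, if_pos hb]
    obtain ⟨tl, hsp⟩ := splitNL_head cs
    rw [hsp, List.takeWhile_cons, if_neg (by simpa using hb), PySem.Chars.join_nil]
    simp
  | case2 cs hb hm ih =>
    rw [cutLen, if_neg hb, dif_pos hm]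
    have h1 := pv_take_decomp (cs.takeWhile (· ≠ '\n')) ((cs.dropWhile (· ≠ '\n')).tail)
      (cutLen ((cs.dropWhile (· ≠ '\n')).tail))
    rw [← pv_decomp hm] at h1
    rw [h1, splitNL_mem hm, List.takeWhile_cons, if_pos (by simpa using hb)]
    obtain ⟨tl2, hsp2⟩ := splitNL_head ((cs.dropWhile (· ≠ '\n')).tail)
    by_cases hb2 : pvBad (((cs.dropWhile (· ≠ '\n')).tail).takeWhile (· ≠ '\n'))
    · right
      have ht : ((splitNL ((cs.dropWhile (· ≠ '\n')).tail)).takeWhile (fun l => !pvBad l)) = [] := by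
        rw [hsp2, List.takeWhile_cons, if_neg (by simpa using hb2)]
      have hc0 : cutLen ((cs.dropWhile (· ≠ '\n')).tail) = 0 := by
        rw [cutLen, if_pos hb2]
      rw [ht, hc0, PySem.Chars.join_singleton]
      simp
    · have ht : ((splitNL ((cs.dropWhile (· ≠ '\n')).tail)).takeWhile (fun l => !pvBad l)) =
          (((cs.dropWhile (· ≠ '\n')).tail).takeWhile (· ≠ '\n')) ::
            tl2.takeWhile (fun l => !pvBad l) := by
        rw [hsp2, List.takeWhile_cons, if_pos (by simpa using hb2)]
      rw [ht, PySem.Chars.join_cons_cons, ← ht]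
      rcases ih with h | h
      · left
        rw [h, ht]
        simp
      · right
        rw [h, ht]
        simp
  | case3 cs hb hm =>
    left
    rw [cutLen, if_neg hb, dif_neg hm, List.take_length, splitNL_not_mem hm]
    rw [List.takeWhile_cons, if_pos (by rw [← pv_takeWhile_not_mem hm]; simpa using hb)]
    rw [List.takeWhile_nil, PySem.Chars.join_singleton]

theorem pv_lstrip_append (x y : List Char) :
    PySem.Chars.lstrip (x ++ y) =
      if PySem.Chars.lstrip x = [] then PySem.Chars.lstrip y else PySem.Chars.lstrip x ++ y := by
  induction x with
  | nil => simp [PySem.Chars.lstrip]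
  | cons a t ih =>
    simp only [PySem.Chars.lstrip, List.cons_append, List.dropWhile_cons] at *
    by_cases ha : PySem.Chars.isspace a = true
    · simp only [ha, if_true]
      exact ih
    · simp [ha]
theorem pv_rstrip_newline (y : List Char) :
    PySem.Chars.rstrip (y ++ ['\n']) = PySem.Chars.rstrip y := by
  simp only [PySem.Chars.rstrip, List.reverse_append, List.reverse_cons, List.reverse_nil,
    List.nil_append, List.cons_append, List.dropWhile_cons]
  rw [if_pos (show PySem.Chars.isspace '\n' = true from by decide)]
theorem pv_strip_newline (x : List Char) :
    PySem.Chars.strip (x ++ ['\n']) = PySem.Chars.strip x := by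
  simp only [PySem.Chars.strip]
  rw [pv_lstrip_append]
  split
  · rename_i hh
    rw [hh]
    rw [show PySem.Chars.lstrip ['\n'] = [] from by decide]
  · exact pv_rstrip_newline _

-- the two teasers before truncation coincide
theorem pv_core (cs : List Char) :
    PySem.Chars.strip (PySem.Chars.join ['\n']
      (teaserLoopA ((PySem.Chars.split? cs ['\n']).getD []) [])) =
    PySem.Chars.strip (PySem.Chars.slice cs none (some ((scanB cs 0 : Nat) : Int))) := by
  have h1 : PySem.Chars.split? cs ['\n'] = some (splitNL cs) := by
    rw [PySem.Chars.split?, if_neg (by simp), pv_splitOn_eq]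
  rw [h1, Option.getD_some, pv_loopA_eq, List.nil_append]
  have h2 : scanB cs 0 = cutLen cs := by
    have h := pv_scanB_eq cs.length cs 0 (by omega) (by omega)
    simpa using h
  rw [h2, PySem.Chars.slice_eq_listSlice, PySem.List.slice_to_natCast]
  rcases pv_take_cutLen cs with h | h
  · rw [h]
  · rw [h, pv_strip_newline]

-- ===== VERDICT (by name: the statement is the Claim_ definition above) =====
theorem make_teaser_py_spec : Claim_equal_make_teaser_py := by
  intro full_message _
  unfold Spec_make_teaser_py make_teaser_py make_teaser_py_alt
  dsimp only
  rw [pv_core full_message.toList]
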